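-- pv_equiv track=rewrite | github.com/Shubham92166/Data-Structures-and-Algorithm | Graph/findIfPathExistsInGraph.py | bfs
-- ===== SOURCE A (Python) =====
-- import queue, collections
--
-- def bfs(source, dest, adjList, n):
--     q = queue.Queue()
--     q.put(source)
--
--     visited = [False]*n
--
--     visited[source] = True
--
--     while not q.empty():
--         v = q.get()
--
--         if v == dest:
--             return True
--
--         visited[v] = True
--
--         for u in adjList[v]:
--             if u == dest:
--                 return True
--
--             if visited[u] == False:
--                 q.put(u)
--
--     return False
-- ===== SOURCE B (Python) =====
-- def bfs(source, dest, adjList, n):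
--     reach = [False] * n
--     reach[source] = True
--     if source == dest:
--         return True
--     changed = True
--     while changed:
--         changed = False
--         for v in range(n):
--             if reach[v]:
--                 for u in adjList[v]:
--                     if u == dest:
--                         return True
--                     if not reach[u]:
--                         reach[u] = True
--                         changed = True
--     return False
-- ===== Notes on version B (the rewrite author's own statement) =====
-- stated objective: alternative
-- what changed: Replaced the FIFO-queue BFS traversal by a worklist-free fixpoint saturation: repeatedly sweep ALL vertex indices 0..n-1, propagating reachability from every already-reached vertex, until a full sweep changes nothing (transitive-closure-style iteration with no queue and no frontier).
-- outside the precondition, e.g. on bfs(-2, 5, [[5, 5], [], [1]], 2): A returns False, B returns True; on bfs(-1, 5, [[5]], 3): A returns True, B raises IndexError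
import Mathlib
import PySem

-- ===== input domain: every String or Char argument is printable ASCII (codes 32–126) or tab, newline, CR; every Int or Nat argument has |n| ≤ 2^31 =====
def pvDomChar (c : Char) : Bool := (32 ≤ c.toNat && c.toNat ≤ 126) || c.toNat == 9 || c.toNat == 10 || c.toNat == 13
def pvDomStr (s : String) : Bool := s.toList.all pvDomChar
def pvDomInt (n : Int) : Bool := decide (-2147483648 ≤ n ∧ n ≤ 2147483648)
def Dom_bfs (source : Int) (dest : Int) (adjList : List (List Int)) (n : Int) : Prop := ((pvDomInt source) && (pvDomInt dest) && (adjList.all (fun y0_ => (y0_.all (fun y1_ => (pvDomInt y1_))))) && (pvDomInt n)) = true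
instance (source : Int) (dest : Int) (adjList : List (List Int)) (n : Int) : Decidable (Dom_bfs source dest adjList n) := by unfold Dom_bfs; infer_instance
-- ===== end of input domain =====

-- B replaces A's FIFO-queue BFS by a worklist-free fixpoint saturation (repeated full sweeps
-- over all vertex indices until nothing changes); same return value, no speed claim.

-- ── small index/count lemmas the ports' termination proofs cite ──
theorem pvIdx_lt {n : Nat} {i : Int} {k : Nat} (h : PySem.List.pyIdx? n i = some k) : k < n := by
  unfold PySem.List.pyIdx? at h
  split_ifs at h <;> simp_all <;> omega

theorem pvGetD_false_idx {xs : List Bool} {i : Int} (h : PySem.List.pyGetD xs i true = false) :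
    ∃ k, PySem.List.pyIdx? xs.length i = some k ∧ xs[k]? = some false := by
  unfold PySem.List.pyGetD PySem.List.pyGet? at h
  cases hk : PySem.List.pyIdx? xs.length i with
  | none => simp [hk] at h
  | some k =>
    refine ⟨k, rfl, ?_⟩
    rw [hk] at h
    cases hv : xs[k]? with
    | none => simp [hv] at h
    | some b => simp [hv] at h; simp [h]

theorem pvSetD_idx {xs : List Bool} {i : Int} {k : Nat} (v : Bool)
    (h : PySem.List.pyIdx? xs.length i = some k) :
    PySem.List.pySet? xs i v = some (xs.set k v) ∧ PySem.List.pySetD xs i v = xs.set k v := by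
  unfold PySem.List.pySet? PySem.List.pySetD
  rw [h]; simp [PySem.List.pySet?, h]

theorem pvCount_set_false {xs : List Bool} {k : Nat} (h : xs[k]? = some false) :
    (xs.set k true).count false + 1 = xs.count false := by
  induction xs generalizing k with
  | nil => simp at h
  | cons a as ih =>
    cases k with
    | zero =>
      simp only [List.getElem?_cons_zero, Option.some.injEq] at h
      subst h; simp
    | succ k =>
      simp only [List.getElem?_cons_succ] at h
      simp only [List.set_cons_succ, List.count_cons]
      have := ih h
      split <;> omega

-- ===== PORT A =====
-- inner 'for u in adjList[v]' loop: returns none when u == dest (early True), else the enqueued nodes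
def bfsScan (dest : Int) (visited : List Bool) (l : List Int) (acc : List Int) : Option (List Int) :=
  match l with
  | [] => some acc
  | u :: rest =>
    if u = dest then none
    else if PySem.List.pyGetD visited u true = false then bfsScan dest visited rest (acc ++ [u])
    else bfsScan dest visited rest acc

theorem bfsScan_some_false {dest : Int} {visited : List Bool} {l acc adds : List Int}
    (h : bfsScan dest visited l acc = some adds) :
    ∀ u ∈ adds, u ∈ acc ∨ PySem.List.pyGetD visited u true = false := by
  induction l generalizing acc with
  | nil => simp [bfsScan] at h; subst h; exact fun u hu => Or.inl hu
  | cons a rest ih =>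
    unfold bfsScan at h
    split_ifs at h with h1 h2
    · intro u hu
      rcases ih h u hu with h' | h'
      · rcases List.mem_append.mp h' with h'' | h''
        · exact Or.inl h''
        · simp at h''; subst h''; exact Or.inr h2
      · exact Or.inr h'
    · exact ih h

theorem pvSet?_some_idx {xs : List Bool} {i : Int} {v : Bool} {ys : List Bool}
    (h : PySem.List.pySet? xs i v = some ys) :
    ∃ k, PySem.List.pyIdx? xs.length i = some k ∧ ys = xs.set k v := by
  unfold PySem.List.pySet? at h
  cases hk : PySem.List.pyIdx? xs.length i with
  | none => rw [hk] at h; simp at h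
  | some k => rw [hk] at h; simp at h; exact ⟨k, rfl, h.symm⟩

theorem pv_set_self {xs : List Bool} {k : Nat} (h : xs[k]? = some true) : xs.set k true = xs := by
  apply List.ext_getElem?
  intro i
  by_cases hik : i = k
  · subst hik; simp [List.getElem?_set_self', h]
  · rw [List.getElem?_set_ne (by omega)]

theorem pvGetD_true_at {xs : List Bool} {i : Int} {k : Nat}
    (hk : PySem.List.pyIdx? xs.length i = some k)
    (ht : PySem.List.pyGetD xs i true = true) : xs[k]? = some true := by
  have hklt := pvIdx_lt hk
  unfold PySem.List.pyGetD PySem.List.pyGet? at ht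
  rw [hk] at ht
  cases hv : xs[k]? with
  | none => rw [List.getElem?_eq_none_iff] at hv; omega
  | some b => simp [hv] at ht; rw [ht]

def bfsLoop (dest : Int) (adjList : List (List Int)) (q : List Int) (visited : List Bool) : Bool :=
  match q with
  | [] => false
  | v :: rest =>
    if v = dest then true
    else
      match hset : PySem.List.pySet? visited v true with
      | none => false          -- IndexError in Python (outside Pre_)
      | some visited' =>
        match hget : PySem.List.pyGet? adjList v with
        | none => false        -- IndexError in Python (outside Pre_)
        | some l =>
          match hscan : bfsScan dest visited' l [] with
          | none => true
          | some adds => bfsLoop dest adjList (rest ++ adds) visited'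
termination_by (visited.count false, (q.filter (fun u => PySem.List.pyGetD visited u true)).length)
decreasing_by
  cases hvb : PySem.List.pyGetD visited v true with
  | false =>
    obtain ⟨k, hk, hv⟩ := pvGetD_false_idx hvb
    have hset' := (pvSetD_idx true hk).1
    rw [hset'] at hset
    injection hset with hset
    subst hset
    apply Prod.Lex.left
    have := pvCount_set_false hv
    omega
  | true =>
    obtain ⟨k, hk, hys⟩ := pvSet?_some_idx hset
    have hnoop : visited' = visited := by
      rw [hys]; exact pv_set_self (pvGetD_true_at hk hvb)
    subst hnoop
    have hadds : adds.filter (fun u => PySem.List.pyGetD visited' u true) = [] := by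
      rw [List.filter_eq_nil_iff]
      intro u hu
      rcases bfsScan_some_false hscan u hu with h' | h'
      · simp at h'
      · simp [h']
    have h2 : ((rest ++ adds).filter (fun u => PySem.List.pyGetD visited' u true)).length
        < ((v :: rest).filter (fun u => PySem.List.pyGetD visited' u true)).length := by
      rw [List.filter_append, hadds, List.filter_cons]
      simp [hvb]
    exact Prod.Lex.right _ h2

def bfs (source : Int) (dest : Int) (adjList : List (List Int)) (n : Int) : Bool :=
  let visited := List.replicate n.toNat false
  match PySem.List.pySet? visited source true with
  | none => false              -- IndexError in Python (outside Pre_)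
  | some visited1 => bfsLoop dest adjList [source] visited1

-- ===== PORT B =====
-- inner 'for u in adjList[v]' loop of Source B: none = dest found (early True); otherwise mark the
-- unmarked entries and record whether anything changed.  reach[u] is ported as pyGetD/pySetD,
-- exact for -len ≤ u < len (guaranteed inside Pre_).
def satRow (dest : Int) (reach : List Bool) (l : List Int) (changed : Bool) :
    Option (List Bool × Bool) :=
  match l with
  | [] => some (reach, changed)
  | u :: rest =>
    if u = dest then none
    else if PySem.List.pyGetD reach u true = false then
      satRow dest (PySem.List.pySetD reach u true) rest true
    else satRow dest reach rest changed

-- 'for v in range(n)' sweep: none = IndexError (outside Pre_); some none = dest found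
def satPass (dest : Int) (adjList : List (List Int)) (vs : List Int) (reach : List Bool)
    (changed : Bool) : Option (Option (List Bool × Bool)) :=
  match vs with
  | [] => some (some (reach, changed))
  | v :: rest =>
    match PySem.List.pyGet? reach v with
    | none => none
    | some b =>
      if b then
        match PySem.List.pyGet? adjList v with
        | none => none
        | some l =>
          match satRow dest reach l changed with
          | none => some none
          | some p => satPass dest adjList rest p.1 p.2
      else satPass dest adjList rest reach changed

-- unfold equations for satPass (cited by the proofs below)
theorem satPass_cons_skip {dest v : Int} {adj : List (List Int)} {rest : List Int}
    {reach : List Bool} {ch : Bool} (hgr : PySem.List.pyGet? reach v = some false) :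
    satPass dest adj (v :: rest) reach ch = satPass dest adj rest reach ch := by
  conv_lhs => rw [satPass]
  rw [hgr]
  rfl

theorem satPass_cons_err1 {dest v : Int} {adj : List (List Int)} {rest : List Int}
    {reach : List Bool} {ch : Bool} (hgr : PySem.List.pyGet? reach v = none) :
    satPass dest adj (v :: rest) reach ch = none := by
  conv_lhs => rw [satPass]
  rw [hgr]

theorem satPass_cons_err2 {dest v : Int} {adj : List (List Int)} {rest : List Int}
    {reach : List Bool} {ch : Bool} (hgr : PySem.List.pyGet? reach v = some true)
    (hga : PySem.List.pyGet? adj v = none) :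
    satPass dest adj (v :: rest) reach ch = none := by
  conv_lhs => rw [satPass]
  rw [hgr]
  simp only [if_true]
  rw [hga]

theorem satPass_cons_found {dest v : Int} {adj : List (List Int)} {rest l : List Int}
    {reach : List Bool} {ch : Bool} (hgr : PySem.List.pyGet? reach v = some true)
    (hga : PySem.List.pyGet? adj v = some l) (hrow : satRow dest reach l ch = none) :
    satPass dest adj (v :: rest) reach ch = some none := by
  conv_lhs => rw [satPass]
  rw [hgr]
  simp only [if_true]
  rw [hga]
  simp only
  rw [hrow]

theorem satPass_cons_step {dest v : Int} {adj : List (List Int)} {rest l : List Int}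
    {reach : List Bool} {ch : Bool} {q : List Bool × Bool}
    (hgr : PySem.List.pyGet? reach v = some true)
    (hga : PySem.List.pyGet? adj v = some l) (hrow : satRow dest reach l ch = some q) :
    satPass dest adj (v :: rest) reach ch = satPass dest adj rest q.1 q.2 := by
  conv_lhs => rw [satPass]
  rw [hgr]
  simp only [if_true]
  rw [hga]
  simp only
  rw [hrow]

theorem satRow_count {dest : Int} {reach : List Bool} {l : List Int} {ch : Bool}
    {p : List Bool × Bool} (h : satRow dest reach l ch = some p) :
    p.1.count false ≤ reach.count false ∧
      (p.2 = true → ch = true ∨ p.1.count false < reach.count false) := by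
  induction l generalizing reach ch with
  | nil =>
    simp [satRow] at h
    subst h
    exact ⟨le_refl _, fun h2 => Or.inl h2⟩
  | cons u rest ih =>
    unfold satRow at h
    split_ifs at h with h1 h2
    · obtain ⟨k, hk, hv⟩ := pvGetD_false_idx h2
      rw [(pvSetD_idx true hk).2] at h
      have hcount := pvCount_set_false hv
      obtain ⟨hle, _⟩ := ih h
      exact ⟨by omega, fun _ => Or.inr (by omega)⟩
    · exact ih h

theorem satPass_count {dest : Int} {adjList : List (List Int)} {vs : List Int}
    {reach : List Bool} {ch : Bool} {p : List Bool × Bool}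
    (h : satPass dest adjList vs reach ch = some (some p)) :
    p.1.count false ≤ reach.count false ∧
      (p.2 = true → ch = true ∨ p.1.count false < reach.count false) := by
  induction vs generalizing reach ch with
  | nil =>
    simp [satPass] at h
    subst h
    exact ⟨le_refl _, fun h2 => Or.inl h2⟩
  | cons v rest ih =>
    cases hgr : PySem.List.pyGet? reach v with
    | none => rw [satPass_cons_err1 hgr] at h; cases h
    | some bb =>
      cases bb with
      | false => exact ih (by rw [satPass_cons_skip hgr] at h; exact h)
      | true =>
        cases hga : PySem.List.pyGet? adjList v with
        | none => rw [satPass_cons_err2 hgr hga] at h; cases h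
        | some l =>
          cases hrow : satRow dest reach l ch with
          | none => rw [satPass_cons_found hgr hga hrow] at h; simp at h
          | some q =>
            rw [satPass_cons_step hgr hga hrow] at h
            obtain ⟨hle1, hch1⟩ := satRow_count hrow
            obtain ⟨hle2, hch2⟩ := ih h
            refine ⟨le_trans hle2 hle1, fun hp => ?_⟩
            rcases hch2 hp with hq | hq
            · rcases hch1 hq with h' | h'
              · exact Or.inl h'
              · exact Or.inr (by omega)
            · exact Or.inr (by omega)

-- outer 'while changed' loop (changed reset to False, one full sweep, repeat while it set it)
def satLoop (dest : Int) (adjList : List (List Int)) (n : Int) (reach : List Bool) : Bool :=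
  match hpass : satPass dest adjList (PySem.List.pyRange 0 n 1) reach false with
  | none => false              -- IndexError in Python (outside Pre_)
  | some none => true
  | some (some p) =>
    if hch : p.2 = true then satLoop dest adjList n p.1 else false
termination_by reach.count false
decreasing_by
  rcases (satPass_count hpass).2 hch with h | h
  · exact absurd h (by decide)
  · exact h

def bfs_alt (source : Int) (dest : Int) (adjList : List (List Int)) (n : Int) : Bool :=
  let reach := List.replicate n.toNat false
  match PySem.List.pySet? reach source true with
  | none => false              -- IndexError in Python (outside Pre_)
  | some reach1 =>
    if source = dest then true
    else satLoop dest adjList n reach1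

-- ===== PRECONDITION & SPEC =====
-- Pre_ admits the natural graph shape (n = number of vertices, 0 ≤ source < n, every adjacency
-- entry a vertex of the graph) plus the trivial source == dest case (A answers before traversing)
-- and the dest-in-source's-row case; outside it A may raise IndexError depending on the traversal,
-- and where it does return, the value depends on Python's negative-index wraparound aliasing
-- nodes, an accident of indexing that a traversal-order-independent reimplementation cannot
-- share, so those inputs are excluded.
def Pre_bfs (source : Int) (dest : Int) (adjList : List (List Int)) (n : Int) : Prop :=
  (0 ≤ source ∧ source < n ∧ source < (adjList.length : Int) ∧
    ∀ l ∈ adjList, ∀ u ∈ l, 0 ≤ u ∧ u < n ∧ u < (adjList.length : Int)) ∨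
  (-n ≤ source ∧ source < n ∧ source = dest) ∨
  (0 ≤ source ∧ source < n ∧ source < (adjList.length : Int) ∧ source ≠ dest ∧
    dest ∈ ((PySem.List.pyGet? adjList source).getD []) ∧
    ∀ u ∈ ((PySem.List.pyGet? adjList source).getD []).takeWhile (fun u => u != dest),
      -n ≤ u ∧ u < n)
instance (source : Int) (dest : Int) (adjList : List (List Int)) (n : Int) :
    Decidable (Pre_bfs source dest adjList n) := by unfold Pre_bfs; infer_instance

def pvWitness_bfs : Int × Int × List (List Int) × Int := (0, 2, [[1], [0], []], 3)

def Spec_bfs (source : Int) (dest : Int) (adjList : List (List Int)) (n : Int) (out : Bool) : Prop := out = bfs_alt source dest adjList n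
instance (source : Int) (dest : Int) (adjList : List (List Int)) (n : Int) (out : Bool) : Decidable (Spec_bfs source dest adjList n out) := by unfold Spec_bfs; infer_instance

-- ===== CLAIM (what is proved, stated in full; the proofs are below) =====
def Claim_equal_bfs : Prop := ∀ (source : Int) (dest : Int) (adjList : List (List Int)) (n : Int), Dom_bfs source dest adjList n → Pre_bfs source dest adjList n → Spec_bfs source dest adjList n (bfs source dest adjList n)

-- ===== LEMMAS AND PROOFS =====

-- ── pyGetD / set facts on resolved indices ──
theorem pvIdx_of_IR {len : Nat} {i : Int} (h0 : 0 ≤ i) (h1 : i < (len : Int)) :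
    PySem.List.pyIdx? len i = some i.toNat := by
  simp [PySem.List.pyIdx?, h0, h1]

theorem pvGetD_eq {xs : List Bool} {i : Int} {k : Nat}
    (hk : PySem.List.pyIdx? xs.length i = some k) :
    PySem.List.pyGetD xs i true = (xs[k]?).getD true := by
  simp [PySem.List.pyGetD, PySem.List.pyGet?, hk]

theorem pvGetD_of_idx_none {xs : List Bool} {i : Int}
    (hk : PySem.List.pyIdx? xs.length i = none) :
    PySem.List.pyGetD xs i true = true := by
  simp [PySem.List.pyGetD, PySem.List.pyGet?, hk]

theorem pvGetD_set_self {xs : List Bool} {i : Int} {k : Nat}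
    (hk : PySem.List.pyIdx? xs.length i = some k) :
    PySem.List.pyGetD (xs.set k true) i true = true := by
  have hklt := pvIdx_lt hk
  have hk' : PySem.List.pyIdx? (xs.set k true).length i = some k := by
    rw [List.length_set]; exact hk
  rw [pvGetD_eq hk', List.getElem?_set_eq_of_lt _ hklt]
  rfl

theorem pvGetD_set_mono {xs : List Bool} {k : Nat} (x : Int) (hklt : k < xs.length)
    (h : PySem.List.pyGetD xs x true = true) :
    PySem.List.pyGetD (xs.set k true) x true = true := by
  cases hj : PySem.List.pyIdx? xs.length x with
  | none => exact pvGetD_of_idx_none (by rw [List.length_set]; exact hj)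
  | some j =>
    have hj' : PySem.List.pyIdx? (xs.set k true).length x = some j := by
      rw [List.length_set]; exact hj
    rw [pvGetD_eq hj']
    rw [pvGetD_eq hj] at h
    by_cases hjk : j = k
    · subst hjk; rw [List.getElem?_set_eq_of_lt _ hklt]; rfl
    · rw [List.getElem?_set_ne (by omega)]; exact h

theorem pvGetD_set_other {xs : List Bool} {k : Nat} {x : Int} {j : Nat}
    (hj : PySem.List.pyIdx? xs.length x = some j) (hjk : j ≠ k) :
    PySem.List.pyGetD (xs.set k true) x true = PySem.List.pyGetD xs x true := by
  have hj' : PySem.List.pyIdx? (xs.set k true).length x = some j := by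
    rw [List.length_set]; exact hj
  rw [pvGetD_eq hj', pvGetD_eq hj, List.getElem?_set_ne (by omega)]

theorem pvGetD_replicate_false {m : Nat} {x : Int} (h0 : 0 ≤ x) (h1 : x < (m : Int)) :
    PySem.List.pyGetD (List.replicate m false) x true = false := by
  have hk : PySem.List.pyIdx? (List.replicate m false).length x = some x.toNat := by
    rw [List.length_replicate]; exact pvIdx_of_IR h0 h1
  rw [pvGetD_eq hk, List.getElem?_replicate]
  have : x.toNat < m := by omega
  simp [this]

theorem pvGetD_of_pyGet?_true {xs : List Bool} {i : Int}
    (h : PySem.List.pyGet? xs i = some true) : PySem.List.pyGetD xs i true = true := by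
  simp [PySem.List.pyGetD, h]

-- ── bfsScan characterisation ──
theorem bfsScan_none {dest : Int} {vs : List Bool} {l acc : List Int}
    (h : bfsScan dest vs l acc = none) : dest ∈ l := by
  induction l generalizing acc with
  | nil => simp [bfsScan] at h
  | cons a rest ih =>
    unfold bfsScan at h
    split_ifs at h with h1 h2
    · subst h1; exact List.mem_cons_self
    · exact List.mem_cons_of_mem _ (ih h)
    · exact List.mem_cons_of_mem _ (ih h)

theorem bfsScan_some_mem {dest : Int} {vs : List Bool} {l acc adds : List Int}
    (h : bfsScan dest vs l acc = some adds) : ∀ u ∈ adds, u ∈ acc ∨ u ∈ l := by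
  induction l generalizing acc with
  | nil => simp [bfsScan] at h; subst h; exact fun u hu => Or.inl hu
  | cons a rest ih =>
    unfold bfsScan at h
    split_ifs at h with h1 h2
    · intro u hu
      rcases ih h u hu with h' | h'
      · rcases List.mem_append.mp h' with h'' | h''
        · exact Or.inl h''
        · simp at h''; subst h''; exact Or.inr List.mem_cons_self
      · exact Or.inr (List.mem_cons_of_mem _ h')
    · intro u hu
      rcases ih h u hu with h' | h'
      · exact Or.inl h'
      · exact Or.inr (List.mem_cons_of_mem _ h')

theorem bfsScan_acc_sub {dest : Int} {vs : List Bool} {l acc adds : List Int}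
    (h : bfsScan dest vs l acc = some adds) : ∀ u ∈ acc, u ∈ adds := by
  induction l generalizing acc with
  | nil => simp [bfsScan] at h; subst h; exact fun u hu => hu
  | cons a rest ih =>
    unfold bfsScan at h
    split_ifs at h with h1 h2
    · intro u hu; exact ih h u (List.mem_append.mpr (Or.inl hu))
    · exact ih h

theorem bfsScan_cover {dest : Int} {vs : List Bool} {l acc adds : List Int}
    (h : bfsScan dest vs l acc = some adds) :
    ∀ u ∈ l, PySem.List.pyGetD vs u true = true ∨ u ∈ adds := by
  induction l generalizing acc with
  | nil => simp
  | cons a rest ih =>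
    unfold bfsScan at h
    split_ifs at h with h1 h2
    · intro u hu
      rcases List.mem_cons.mp hu with h' | h'
      · subst h'
        exact Or.inr (bfsScan_acc_sub h u (List.mem_append.mpr (Or.inr (by simp))))
      · exact ih h u h'
    · intro u hu
      rcases List.mem_cons.mp hu with h' | h'
      · subst h'
        cases hb : PySem.List.pyGetD vs u true with
        | false => exact absurd hb h2
        | true => exact Or.inl rfl
      · exact ih h u h'

-- ── bfsLoop unfolding lemmas ──
theorem bfsLoop_nil (dest : Int) (adj : List (List Int)) (vs : List Bool) :
    bfsLoop dest adj [] vs = false := by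
  simp [bfsLoop]

theorem bfsLoop_cons_self (dest : Int) (adj : List (List Int)) (rest : List Int) (vs : List Bool) :
    bfsLoop dest adj (dest :: rest) vs = true := by
  simp [bfsLoop]

theorem bfsLoop_cons_scan_none {dest v : Int} {adj : List (List Int)} {rest : List Int}
    {vs vs' : List Bool} {l : List Int} (hne : v ≠ dest)
    (hset : PySem.List.pySet? vs v true = some vs')
    (hget : PySem.List.pyGet? adj v = some l)
    (hscan : bfsScan dest vs' l [] = none) :
    bfsLoop dest adj (v :: rest) vs = true := by
  rw [bfsLoop]
  rw [if_neg hne]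
  split
  · simp_all
  · rename_i vs2 hset2
    rw [hset] at hset2
    injection hset2 with hset2
    subst hset2
    split
    · simp_all
    · rename_i l2 hget2
      rw [hget] at hget2
      injection hget2 with hget2
      subst hget2
      split
      · rfl
      · simp_all

theorem bfsLoop_cons_step {dest v : Int} {adj : List (List Int)} {rest : List Int}
    {vs vs' : List Bool} {l adds : List Int} (hne : v ≠ dest)
    (hset : PySem.List.pySet? vs v true = some vs')
    (hget : PySem.List.pyGet? adj v = some l)
    (hscan : bfsScan dest vs' l [] = some adds) :
    bfsLoop dest adj (v :: rest) vs = bfsLoop dest adj (rest ++ adds) vs' := by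
  conv_lhs => rw [bfsLoop]
  rw [if_neg hne]
  split
  · simp_all
  · rename_i vs2 hset2
    rw [hset] at hset2
    injection hset2 with hset2
    subst hset2
    split
    · simp_all
    · rename_i l2 hget2
      rw [hget] at hget2
      injection hget2 with hget2
      subst hget2
      split
      · simp_all
      · rename_i adds2 hscan2
        rw [hscan] at hscan2
        injection hscan2 with hscan2
        subst hscan2
        rfl

-- the edge relation of the graph and reachability (proof-only notions)
def pvE (adjList : List (List Int)) (v u : Int) : Prop :=
  ∃ l, PySem.List.pyGet? adjList v = some l ∧ u ∈ l
def pvReach (adjList : List (List Int)) (s t : Int) : Prop := Relation.ReflTransGen (pvE adjList) s t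
def pvIR (len : Nat) (x : Int) : Prop := 0 ≤ x ∧ x < (len : Int)

-- ── BFS (port A) computes reachability ──
theorem pvA_sound (dest : Int) (adj : List (List Int)) (s : Int) (q : List Int) (vs : List Bool) :
    bfsLoop dest adj q vs = true → (∀ v ∈ q, pvReach adj s v) → pvReach adj s dest := by
  induction q, vs using bfsLoop.induct dest adj with
  | case1 vs => intro h _; rw [bfsLoop_nil] at h; cases h
  | case2 vs rest => intro _ hq; exact hq dest List.mem_cons_self
  | case3 vs v rest hne hset =>
    intro h _
    rw [bfsLoop] at h
    rw [if_neg hne] at h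
    split at h
    · cases h
    · simp_all
  | case4 vs v rest hne vs' hset hget =>
    intro h _
    rw [bfsLoop] at h
    rw [if_neg hne] at h
    split at h
    · simp_all
    · rename_i vs2 hset2
      rw [hset] at hset2; injection hset2 with hset2; subst hset2
      split at h
      · cases h
      · simp_all
  | case5 vs v rest hne vs' hset l hget hscan =>
    intro _ hq
    have hdl : dest ∈ l := bfsScan_none hscan
    exact Relation.ReflTransGen.tail (hq v List.mem_cons_self) ⟨l, hget, hdl⟩
  | case6 vs v rest hne vs' hset l hget adds hscan ih =>
    intro h hq
    rw [bfsLoop_cons_step hne hset hget hscan] at h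
    apply ih h
    intro w hw
    rcases List.mem_append.mp hw with h' | h'
    · exact hq w (List.mem_cons_of_mem _ h')
    · rcases bfsScan_some_mem hscan w h' with h'' | h''
      · simp at h''
      · exact Relation.ReflTransGen.tail (hq v List.mem_cons_self) ⟨l, hget, h''⟩

theorem pvClosed_unreach (dest : Int) (adj : List (List Int)) (b : Nat)
    (hok : ∀ l ∈ adj, ∀ u ∈ l, pvIR b u) (vs : List Bool)
    (hinv : ∀ x, pvIR b x → PySem.List.pyGetD vs x true = true →
      x ≠ dest ∧ ∀ u, pvE adj x u → PySem.List.pyGetD vs u true = true) :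
    ∀ x, pvReach adj x dest → pvIR b x → PySem.List.pyGetD vs x true = true → False := by
  intro x hreach
  induction hreach using Relation.ReflTransGen.head_induction_on with
  | refl => intro hx hvx; exact (hinv dest hx hvx).1 rfl
  | head hstep _ ih =>
    rename_i a c _
    intro hx hvx
    obtain ⟨l, hgl, hcl⟩ := hstep
    have hlmem : l ∈ adj := PySem.List.mem_of_pyGet?_eq_some _ hgl
    have hcIR : pvIR b c := hok l hlmem c hcl
    exact ih hcIR ((hinv a hx hvx).2 c ⟨l, hgl, hcl⟩)

theorem pvA_complete (dest : Int) (adj : List (List Int)) (b : Nat)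
    (hok : ∀ l ∈ adj, ∀ u ∈ l, pvIR b u) (hba : b ≤ adj.length)
    (q : List Int) (vs : List Bool) :
    b ≤ vs.length →
    (∀ v ∈ q, pvIR b v) →
    (∀ x, pvIR b x → PySem.List.pyGetD vs x true = true →
      x ∈ q ∨ (x ≠ dest ∧ ∀ u, pvE adj x u → PySem.List.pyGetD vs u true = true ∨ u ∈ q)) →
    bfsLoop dest adj q vs = false →
    ∀ x, pvIR b x → (PySem.List.pyGetD vs x true = true ∨ x ∈ q) →
      ¬ pvReach adj x dest := by
  induction q, vs using bfsLoop.induct dest adj with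
  | case1 vs =>
    intro _ _ hinv _ x hx hmem hreach
    have hinv' : ∀ x, pvIR b x → PySem.List.pyGetD vs x true = true →
        x ≠ dest ∧ ∀ u, pvE adj x u → PySem.List.pyGetD vs u true = true := by
      intro y hy hvy
      rcases hinv y hy hvy with h | ⟨hnd, hsucc⟩
      · simp at h
      · refine ⟨hnd, fun u hu => ?_⟩
        rcases hsucc u hu with h' | h'
        · exact h'
        · simp at h'
    rcases hmem with hv | h
    · exact pvClosed_unreach dest adj b hok vs hinv' x hreach hx hv
    · simp at h
  | case2 vs rest =>
    intro _ _ _ hfalse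
    rw [bfsLoop_cons_self] at hfalse
    cases hfalse
  | case3 vs v rest hne hset =>
    intro hlen hq _ _
    have hvIR := hq v List.mem_cons_self
    have hkv : PySem.List.pyIdx? vs.length v = some v.toNat :=
      pvIdx_of_IR hvIR.1 (by have := hvIR.2; omega)
    rw [(pvSetD_idx true hkv).1] at hset
    cases hset
  | case4 vs v rest hne vs' hset hget =>
    intro hlen hq _ _
    have hvIR := hq v List.mem_cons_self
    rw [PySem.List.pyGet?_eq_some_getElem adj hvIR.1 (by have := hvIR.2; omega)] at hget
    cases hget
  | case5 vs v rest hne vs' hset l hget hscan =>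
    intro _ _ _ hfalse
    rw [bfsLoop_cons_scan_none hne hset hget hscan] at hfalse
    cases hfalse
  | case6 vs v rest hne vs' hset l hget adds hscan ih =>
    intro hlen hq hinv hfalse x hx hmem
    have hvIR := hq v List.mem_cons_self
    have hkv : PySem.List.pyIdx? vs.length v = some v.toNat :=
      pvIdx_of_IR hvIR.1 (by have := hvIR.2; omega)
    have hvs' : vs' = vs.set v.toNat true := by
      rw [(pvSetD_idx true hkv).1] at hset
      injection hset with hset
      exact hset.symm
    subst hvs'
    have hvlt : v.toNat < vs.length := pvIdx_lt hkv
    rw [bfsLoop_cons_step hne hset hget hscan] at hfalse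
    have hlen' : b ≤ (vs.set v.toNat true).length := by
      rw [List.length_set]; exact hlen
    have hladj : l ∈ adj := PySem.List.mem_of_pyGet?_eq_some _ hget
    have hq' : ∀ w ∈ rest ++ adds, pvIR b w := by
      intro w hw
      rcases List.mem_append.mp hw with h' | h'
      · exact hq w (List.mem_cons_of_mem _ h')
      · rcases bfsScan_some_mem hscan w h' with h'' | h''
        · simp at h''
        · exact hok l hladj w h''
    have hinv' : ∀ y, pvIR b y → PySem.List.pyGetD (vs.set v.toNat true) y true = true →
        y ∈ rest ++ adds ∨ (y ≠ dest ∧ ∀ u, pvE adj y u →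
          PySem.List.pyGetD (vs.set v.toNat true) u true = true ∨ u ∈ rest ++ adds) := by
      intro y hyIR hy'
      by_cases hyv : y = v
      · subst hyv
        right
        refine ⟨hne, fun u hEu => ?_⟩
        obtain ⟨l', hgl', hul⟩ := hEu
        rw [hget] at hgl'
        injection hgl' with hgl'
        subst hgl'
        rcases bfsScan_cover hscan u hul with h' | h'
        · exact Or.inl h'
        · exact Or.inr (List.mem_append.mpr (Or.inr h'))
      · have hky : PySem.List.pyIdx? vs.length y = some y.toNat :=
          pvIdx_of_IR hyIR.1 (by have := hyIR.2; omega)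
        have hynv : y.toNat ≠ v.toNat := by
          have := hvIR.1; have := hyIR.1; omega
        have hold : PySem.List.pyGetD vs y true = true := by
          rw [← pvGetD_set_other hky hynv]; exact hy'
        rcases hinv y hyIR hold with hmemq | ⟨hnd, hsucc⟩
        · rcases List.mem_cons.mp hmemq with h' | h'
          · exact absurd h' hyv
          · exact Or.inl (List.mem_append.mpr (Or.inl h'))
        · right
          refine ⟨hnd, fun u hEu => ?_⟩
          rcases hsucc u hEu with h' | h'
          · exact Or.inl (pvGetD_set_mono u hvlt h')
          · rcases List.mem_cons.mp h' with h'' | h''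
            · subst h''; exact Or.inl (pvGetD_set_self hkv)
            · exact Or.inr (List.mem_append.mpr (Or.inl h''))
    apply ih hlen' hq' hinv' hfalse x hx
    rcases hmem with hv | hmemq
    · exact Or.inl (pvGetD_set_mono x hvlt hv)
    · rcases List.mem_cons.mp hmemq with h' | h'
      · subst h'; exact Or.inl (pvGetD_set_self hkv)
      · exact Or.inr (List.mem_append.mpr (Or.inl h'))

-- ── invariant of B's reach array: marked ⇒ in range, reachable from s, not dest ──
def pvGood (adj : List (List Int)) (b : Nat) (s dest : Int) (reach : List Bool) : Prop :=
  ∀ x : Int, 0 ≤ x → x < (reach.length : Int) → PySem.List.pyGetD reach x true = true →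
    pvIR b x ∧ pvReach adj s x ∧ x ≠ dest

-- ── satRow characterisation ──
theorem satRow_none_of_mem {dest : Int} {reach : List Bool} {l : List Int} {ch : Bool}
    (h : dest ∈ l) : satRow dest reach l ch = none := by
  induction l generalizing reach ch with
  | nil => simp at h
  | cons a rest ih =>
    unfold satRow
    split_ifs with h1 h2
    · rfl
    · refine ih ?_
      rcases List.mem_cons.mp h with h' | h'
      · exact absurd h'.symm h1
      · exact h'
    · refine ih ?_
      rcases List.mem_cons.mp h with h' | h'
      · exact absurd h'.symm h1
      · exact h'

theorem satRow_not_mem {dest : Int} {reach : List Bool} {l : List Int} {ch : Bool}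
    {p : List Bool × Bool} (h : satRow dest reach l ch = some p) : dest ∉ l := by
  intro hmem
  rw [satRow_none_of_mem hmem] at h
  cases h

theorem satRow_none_mem {dest : Int} {reach : List Bool} {l : List Int} {ch : Bool}
    (h : satRow dest reach l ch = none) : dest ∈ l := by
  induction l generalizing reach ch with
  | nil => simp [satRow] at h
  | cons a rest ih =>
    unfold satRow at h
    split_ifs at h with h1 h2
    · subst h1; exact List.mem_cons_self
    · exact List.mem_cons_of_mem _ (ih h)
    · exact List.mem_cons_of_mem _ (ih h)

theorem satRow_len {dest : Int} {reach : List Bool} {l : List Int} {ch : Bool}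
    {p : List Bool × Bool} (h : satRow dest reach l ch = some p) :
    p.1.length = reach.length := by
  induction l generalizing reach ch with
  | nil => simp [satRow] at h; subst h; rfl
  | cons a rest ih =>
    unfold satRow at h
    split_ifs at h with h1 h2
    · rw [ih h, PySem.List.length_pySetD]
    · exact ih h

theorem satRow_mono {dest : Int} {reach : List Bool} {l : List Int} {ch : Bool}
    {p : List Bool × Bool} {x : Int} (h : satRow dest reach l ch = some p)
    (hx : PySem.List.pyGetD reach x true = true) :
    PySem.List.pyGetD p.1 x true = true := by
  induction l generalizing reach ch with
  | nil => simp [satRow] at h; subst h; exact hx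
  | cons a rest ih =>
    unfold satRow at h
    split_ifs at h with h1 h2
    · obtain ⟨k, hk, hv⟩ := pvGetD_false_idx h2
      rw [(pvSetD_idx true hk).2] at h
      exact ih h (pvGetD_set_mono x (pvIdx_lt hk) hx)
    · exact ih h hx

theorem satRow_good {dest s : Int} {adj : List (List Int)} {b : Nat}
    {reach : List Bool} {l : List Int} {ch : Bool} {p : List Bool × Bool}
    (h : satRow dest reach l ch = some p) (hb : b ≤ reach.length)
    (hlok : ∀ u ∈ l, pvIR b u) (hlre : ∀ u ∈ l, pvReach adj s u)
    (hg : pvGood adj b s dest reach) : pvGood adj b s dest p.1 := by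
  induction l generalizing reach ch with
  | nil => simp [satRow] at h; subst h; exact hg
  | cons u rest ih =>
    unfold satRow at h
    split_ifs at h with h1 h2
    · have huIR := hlok u List.mem_cons_self
      have hku : PySem.List.pyIdx? reach.length u = some u.toNat :=
        pvIdx_of_IR huIR.1 (by have := huIR.2; omega)
      rw [(pvSetD_idx true hku).2] at h
      have hlen2 : (reach.set u.toNat true).length = reach.length := List.length_set ..
      refine ih h (by rw [hlen2]; exact hb)
        (fun w hw => hlok w (List.mem_cons_of_mem _ hw))
        (fun w hw => hlre w (List.mem_cons_of_mem _ hw)) ?_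
      intro x hx0 hx1 hxm
      rw [hlen2] at hx1
      have hkx : PySem.List.pyIdx? reach.length x = some x.toNat := pvIdx_of_IR hx0 hx1
      by_cases hxu : x = u
      · subst hxu
        exact ⟨huIR, hlre x List.mem_cons_self, h1⟩
      · have hxnu : x.toNat ≠ u.toNat := by
          have := huIR.1; omega
        rw [pvGetD_set_other hkx hxnu] at hxm
        exact hg x hx0 hx1 hxm
    · exact ih h hb (fun w hw => hlok w (List.mem_cons_of_mem _ hw))
        (fun w hw => hlre w (List.mem_cons_of_mem _ hw)) hg

theorem satRow_changed {dest : Int} {reach : List Bool} {l : List Int}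
    {p : List Bool × Bool} (h : satRow dest reach l true = some p) : p.2 = true := by
  induction l generalizing reach with
  | nil => simp [satRow] at h; subst h; rfl
  | cons a rest ih =>
    unfold satRow at h
    split_ifs at h with h1 h2
    · exact ih h
    · exact ih h

theorem satRow_fix {dest : Int} {reach reach2 : List Bool} {l : List Int}
    (h : satRow dest reach l false = some (reach2, false)) :
    reach2 = reach ∧ ∀ u ∈ l, PySem.List.pyGetD reach u true = true := by
  induction l generalizing reach with
  | nil =>
    simp [satRow] at h
    exact ⟨h.symm, by simp⟩
  | cons a rest ih =>
    unfold satRow at h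
    split_ifs at h with h1 h2
    · have := satRow_changed h
      simp at this
    · obtain ⟨he, hall⟩ := ih h
      have ha : PySem.List.pyGetD reach a true = true := by
        cases hb : PySem.List.pyGetD reach a true with
        | false => exact absurd hb h2
        | true => rfl
      refine ⟨he, fun u hu => ?_⟩
      rcases List.mem_cons.mp hu with h' | h'
      · subst h'; exact ha
      · exact hall u h'

-- ── satPass characterisation ──
theorem satPass_total {dest s : Int} {adj : List (List Int)} {b : Nat}
    (hok : ∀ l ∈ adj, ∀ u ∈ l, pvIR b u) (hba : b ≤ adj.length)
    (vs : List Int) (reach : List Bool) (ch : Bool)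
    (hb : b ≤ reach.length)
    (hvs : ∀ v ∈ vs, 0 ≤ v ∧ v < (reach.length : Int))
    (hg : pvGood adj b s dest reach) :
    ∃ r, satPass dest adj vs reach ch = some r := by
  induction vs generalizing reach ch with
  | nil => exact ⟨some (reach, ch), rfl⟩
  | cons v rest ih =>
    have hv := hvs v List.mem_cons_self
    obtain ⟨bb, hgr⟩ : ∃ bb, PySem.List.pyGet? reach v = some bb :=
      ⟨_, PySem.List.pyGet?_eq_some_getElem reach hv.1 hv.2⟩
    cases bb with
    | false =>
      obtain ⟨r, hr⟩ := ih reach ch hb (fun w hw => hvs w (List.mem_cons_of_mem _ hw)) hg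
      exact ⟨r, by rw [satPass_cons_skip hgr]; exact hr⟩
    | true =>
      have hmk : PySem.List.pyGetD reach v true = true := pvGetD_of_pyGet?_true hgr
      obtain ⟨hvIR, hvre, _⟩ := hg v hv.1 hv.2 hmk
      obtain ⟨l0, hga⟩ : ∃ l0, PySem.List.pyGet? adj v = some l0 :=
        ⟨_, PySem.List.pyGet?_eq_some_getElem adj hvIR.1 (by
          have h2 := hvIR.2; omega)⟩
      have hladj : l0 ∈ adj := PySem.List.mem_of_pyGet?_eq_some _ hga
      cases hrow : satRow dest reach l0 ch with
      | none => exact ⟨none, satPass_cons_found hgr hga hrow⟩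
      | some q =>
        have hlre : ∀ u ∈ l0, pvReach adj s u :=
          fun u hu => Relation.ReflTransGen.tail hvre ⟨_, hga, hu⟩
        have hg' := satRow_good hrow hb (hok _ hladj) hlre hg
        have hql := satRow_len hrow
        obtain ⟨r, hr⟩ := ih q.1 q.2 (by rw [hql]; exact hb)
          (by intro w hw; rw [hql]; exact hvs w (List.mem_cons_of_mem _ hw)) hg'
        exact ⟨r, by rw [satPass_cons_step hgr hga hrow]; exact hr⟩

theorem satPass_good {dest s : Int} {adj : List (List Int)} {b : Nat}
    (hok : ∀ l ∈ adj, ∀ u ∈ l, pvIR b u) (hba : b ≤ adj.length)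
    {vs : List Int} {reach : List Bool} {ch : Bool} {p : List Bool × Bool}
    (h : satPass dest adj vs reach ch = some (some p))
    (hb : b ≤ reach.length)
    (hvs : ∀ v ∈ vs, 0 ≤ v ∧ v < (reach.length : Int))
    (hg : pvGood adj b s dest reach) :
    pvGood adj b s dest p.1 ∧ p.1.length = reach.length := by
  induction vs generalizing reach ch with
  | nil =>
    simp [satPass] at h
    subst h
    exact ⟨hg, rfl⟩
  | cons v rest ih =>
    cases hgr : PySem.List.pyGet? reach v with
    | none => rw [satPass_cons_err1 hgr] at h; cases h
    | some bb =>
      cases bb with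
      | false =>
        rw [satPass_cons_skip hgr] at h
        exact ih h hb (fun w hw => hvs w (List.mem_cons_of_mem _ hw)) hg
      | true =>
        have hmk : PySem.List.pyGetD reach v true = true := pvGetD_of_pyGet?_true hgr
        have hv := hvs v List.mem_cons_self
        obtain ⟨hvIR, hvre, _⟩ := hg v hv.1 hv.2 hmk
        cases hga : PySem.List.pyGet? adj v with
        | none => rw [satPass_cons_err2 hgr hga] at h; cases h
        | some l =>
          cases hrow : satRow dest reach l ch with
          | none => rw [satPass_cons_found hgr hga hrow] at h; simp at h
          | some q =>
            rw [satPass_cons_step hgr hga hrow] at h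
            have hladj : l ∈ adj := PySem.List.mem_of_pyGet?_eq_some _ hga
            have hlre : ∀ u ∈ l, pvReach adj s u :=
              fun u hu => Relation.ReflTransGen.tail hvre ⟨_, hga, hu⟩
            have hg' := satRow_good hrow hb (hok _ hladj) hlre hg
            have hql := satRow_len hrow
            obtain ⟨hgp, hlp⟩ := ih h (by rw [hql]; exact hb)
              (by intro w hw; rw [hql]; exact hvs w (List.mem_cons_of_mem _ hw)) hg'
            exact ⟨hgp, by rw [hlp, hql]⟩

theorem satPass_mono {dest : Int} {adj : List (List Int)}
    {vs : List Int} {reach : List Bool} {ch : Bool} {p : List Bool × Bool} {x : Int}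
    (h : satPass dest adj vs reach ch = some (some p))
    (hx : PySem.List.pyGetD reach x true = true) :
    PySem.List.pyGetD p.1 x true = true := by
  induction vs generalizing reach ch with
  | nil => simp [satPass] at h; subst h; exact hx
  | cons v rest ih =>
    cases hgr : PySem.List.pyGet? reach v with
    | none => rw [satPass_cons_err1 hgr] at h; cases h
    | some bb =>
      cases bb with
      | false => rw [satPass_cons_skip hgr] at h; exact ih h hx
      | true =>
        cases hga : PySem.List.pyGet? adj v with
        | none => rw [satPass_cons_err2 hgr hga] at h; cases h
        | some l =>
          cases hrow : satRow dest reach l ch with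
          | none => rw [satPass_cons_found hgr hga hrow] at h; simp at h
          | some q =>
            rw [satPass_cons_step hgr hga hrow] at h
            exact ih h (satRow_mono hrow hx)

theorem satPass_found {dest s : Int} {adj : List (List Int)} {b : Nat}
    (hok : ∀ l ∈ adj, ∀ u ∈ l, pvIR b u) (hba : b ≤ adj.length)
    {vs : List Int} {reach : List Bool} {ch : Bool}
    (h : satPass dest adj vs reach ch = some none)
    (hb : b ≤ reach.length)
    (hvs : ∀ v ∈ vs, 0 ≤ v ∧ v < (reach.length : Int))
    (hg : pvGood adj b s dest reach) :
    pvReach adj s dest := by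
  induction vs generalizing reach ch with
  | nil => simp [satPass] at h
  | cons v rest ih =>
    cases hgr : PySem.List.pyGet? reach v with
    | none => rw [satPass_cons_err1 hgr] at h; cases h
    | some bb =>
      cases bb with
      | false =>
        rw [satPass_cons_skip hgr] at h
        exact ih h hb (fun w hw => hvs w (List.mem_cons_of_mem _ hw)) hg
      | true =>
        have hmk : PySem.List.pyGetD reach v true = true := pvGetD_of_pyGet?_true hgr
        have hv := hvs v List.mem_cons_self
        obtain ⟨hvIR, hvre, _⟩ := hg v hv.1 hv.2 hmk
        cases hga : PySem.List.pyGet? adj v with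
        | none => rw [satPass_cons_err2 hgr hga] at h; cases h
        | some l =>
          cases hrow : satRow dest reach l ch with
          | none =>
            exact Relation.ReflTransGen.tail hvre ⟨l, hga, satRow_none_mem hrow⟩
          | some q =>
            rw [satPass_cons_step hgr hga hrow] at h
            have hladj : l ∈ adj := PySem.List.mem_of_pyGet?_eq_some _ hga
            have hlre : ∀ u ∈ l, pvReach adj s u :=
              fun u hu => Relation.ReflTransGen.tail hvre ⟨_, hga, hu⟩
            have hg' := satRow_good hrow hb (hok _ hladj) hlre hg
            have hql := satRow_len hrow
            exact ih h (by rw [hql]; exact hb)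
              (by intro w hw; rw [hql]; exact hvs w (List.mem_cons_of_mem _ hw)) hg'

theorem satPass_changed {dest : Int} {adj : List (List Int)}
    {vs : List Int} {reach : List Bool} {p : List Bool × Bool}
    (h : satPass dest adj vs reach true = some (some p)) : p.2 = true := by
  induction vs generalizing reach with
  | nil => simp [satPass] at h; subst h; rfl
  | cons v rest ih =>
    cases hgr : PySem.List.pyGet? reach v with
    | none => rw [satPass_cons_err1 hgr] at h; cases h
    | some bb =>
      cases bb with
      | false => rw [satPass_cons_skip hgr] at h; exact ih h
      | true =>
        cases hga : PySem.List.pyGet? adj v with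
        | none => rw [satPass_cons_err2 hgr hga] at h; cases h
        | some l =>
          cases hrow : satRow dest reach l true with
          | none => rw [satPass_cons_found hgr hga hrow] at h; simp at h
          | some q =>
            rw [satPass_cons_step hgr hga hrow] at h
            have hq2 : q.2 = true := satRow_changed hrow
            rw [hq2] at h
            exact ih h

theorem satPass_fix {dest : Int} {adj : List (List Int)}
    {vs : List Int} {reach reach2 : List Bool}
    (h : satPass dest adj vs reach false = some (some (reach2, false))) :
    reach2 = reach ∧ ∀ v ∈ vs, PySem.List.pyGetD reach v true = true →
      ∀ row, PySem.List.pyGet? adj v = some row →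
        ∀ u ∈ row, u ≠ dest ∧ PySem.List.pyGetD reach u true = true := by
  induction vs generalizing reach with
  | nil =>
    simp [satPass] at h
    exact ⟨h.symm, by simp⟩
  | cons v rest ih =>
    cases hgr : PySem.List.pyGet? reach v with
    | none => rw [satPass_cons_err1 hgr] at h; cases h
    | some bb =>
      cases bb with
      | false =>
        rw [satPass_cons_skip hgr] at h
        obtain ⟨he, hrest⟩ := ih h
        refine ⟨he, fun w hw hmw row hrw u hu => ?_⟩
        rcases List.mem_cons.mp hw with h' | h'
        · subst h'
          have : PySem.List.pyGetD reach w true = false := by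
            simp [PySem.List.pyGetD, hgr]
          rw [this] at hmw
          cases hmw
        · exact hrest w h' hmw row hrw u hu
      | true =>
        cases hga : PySem.List.pyGet? adj v with
        | none => rw [satPass_cons_err2 hgr hga] at h; cases h
        | some l =>
          cases hrow : satRow dest reach l false with
          | none => rw [satPass_cons_found hgr hga hrow] at h; simp at h
          | some q =>
            rw [satPass_cons_step hgr hga hrow] at h
            cases hq2 : q.2 with
            | true =>
              rw [hq2] at h
              have := satPass_changed h
              simp at this
            | false =>
              have hq : satRow dest reach l false = some (q.1, false) := by
                rw [hrow]; cases q; simp_all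
              obtain ⟨heq, hall⟩ := satRow_fix hq
              rw [hq2, heq] at h
              obtain ⟨he, hrest⟩ := ih h
              have hnd := satRow_not_mem hq
              refine ⟨he, fun w hw hmw row hrw u hu => ?_⟩
              rcases List.mem_cons.mp hw with h' | h'
              · subst h'
                rw [hga] at hrw
                injection hrw with hrw
                subst hrw
                exact ⟨fun hud => hnd (hud ▸ hu), hall u hu⟩
              · exact hrest w h' hmw row hrw u hu

-- ── satLoop unfolding lemmas ──
theorem satLoop_eq_none {dest : Int} {adj : List (List Int)} {n : Int} {reach : List Bool}
    (hpass : satPass dest adj (PySem.List.pyRange 0 n 1) reach false = none) :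
    satLoop dest adj n reach = false := by
  rw [satLoop]
  split
  · rfl
  · simp_all
  · simp_all

theorem satLoop_eq_found {dest : Int} {adj : List (List Int)} {n : Int} {reach : List Bool}
    (hpass : satPass dest adj (PySem.List.pyRange 0 n 1) reach false = some none) :
    satLoop dest adj n reach = true := by
  rw [satLoop]
  split
  · simp_all
  · rfl
  · simp_all

theorem satLoop_eq_step {dest : Int} {adj : List (List Int)} {n : Int} {reach : List Bool}
    {p : List Bool × Bool}
    (hpass : satPass dest adj (PySem.List.pyRange 0 n 1) reach false = some (some p))
    (hch : p.2 = true) :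
    satLoop dest adj n reach = satLoop dest adj n p.1 := by
  conv_lhs => rw [satLoop]
  split
  · simp_all
  · simp_all
  · rename_i p2 hpass2
    rw [hpass] at hpass2
    injection hpass2 with hpass2
    injection hpass2 with hpass2
    subst hpass2
    rw [dif_pos hch]

theorem satLoop_eq_stop {dest : Int} {adj : List (List Int)} {n : Int} {reach : List Bool}
    {p : List Bool × Bool}
    (hpass : satPass dest adj (PySem.List.pyRange 0 n 1) reach false = some (some p))
    (hch : p.2 = false) :
    satLoop dest adj n reach = false := by
  rw [satLoop]
  split
  · rfl
  · simp_all
  · rename_i p2 hpass2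
    rw [hpass] at hpass2
    injection hpass2 with hpass2
    injection hpass2 with hpass2
    subst hpass2
    rw [dif_neg (by simp [hch])]

-- range membership gives in-range indices for reach of length n.toNat
theorem pvRange_mem_bounds {n : Int} {m : Nat} (hm : m = n.toNat) :
    ∀ v ∈ PySem.List.pyRange 0 n 1, 0 ≤ v ∧ v < (m : Int) := by
  intro v hv
  rw [PySem.List.mem_pyRange_one] at hv
  have hn : 0 ≤ n := le_trans hv.1 (le_of_lt hv.2)
  subst hm
  exact ⟨hv.1, by omega⟩

theorem satLoop_sound {dest s : Int} {adj : List (List Int)} {b : Nat} {n : Int}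
    (hok : ∀ l ∈ adj, ∀ u ∈ l, pvIR b u) (hba : b ≤ adj.length) (hbn : b ≤ n.toNat)
    (reach : List Bool) :
    reach.length = n.toNat → pvGood adj b s dest reach →
    satLoop dest adj n reach = true → pvReach adj s dest := by
  induction reach using satLoop.induct dest adj n with
  | case1 reach hpass =>
    intro _ _ h
    rw [satLoop_eq_none hpass] at h
    cases h
  | case2 reach hpass =>
    intro hlenr hg _
    exact satPass_found hok hba hpass (by omega) (pvRange_mem_bounds hlenr) hg
  | case3 reach p hpass hch ih =>
    intro hlenr hg h
    rw [satLoop_eq_step hpass hch] at h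
    obtain ⟨hgp, hlp⟩ := satPass_good hok hba hpass (by omega)
      (pvRange_mem_bounds hlenr) hg
    exact ih (by rw [hlp, hlenr]) hgp h
  | case4 reach p hpass hch =>
    intro _ _ h
    rw [satLoop_eq_stop hpass (by simpa using hch)] at h
    cases h

theorem satLoop_complete {dest s : Int} {adj : List (List Int)} {b : Nat} {n : Int}
    (hok : ∀ l ∈ adj, ∀ u ∈ l, pvIR b u) (hba : b ≤ adj.length) (hbn : b ≤ n.toNat)
    (hsIR : pvIR b s)
    (reach : List Bool) :
    reach.length = n.toNat → pvGood adj b s dest reach →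
    PySem.List.pyGetD reach s true = true →
    satLoop dest adj n reach = false → ¬ pvReach adj s dest := by
  induction reach using satLoop.induct dest adj n with
  | case1 reach hpass =>
    intro hlenr hg _ _
    obtain ⟨r, hr⟩ := satPass_total hok hba (PySem.List.pyRange 0 n 1) reach false
      (by omega) (pvRange_mem_bounds hlenr) hg
    rw [hr] at hpass
    cases hpass
  | case2 reach hpass =>
    intro _ _ _ h
    rw [satLoop_eq_found hpass] at h
    cases h
  | case3 reach p hpass hch ih =>
    intro hlenr hg hs h
    rw [satLoop_eq_step hpass hch] at h
    obtain ⟨hgp, hlp⟩ := satPass_good hok hba hpass (by omega)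
      (pvRange_mem_bounds hlenr) hg
    exact ih (by rw [hlp, hlenr]) hgp (satPass_mono hpass hs) h
  | case4 reach p hpass hch =>
    intro hlenr hg hs _
    have hch' : p.2 = false := by simpa using hch
    have hpass' : satPass dest adj (PySem.List.pyRange 0 n 1) reach false
        = some (some (p.1, false)) := by
      rw [hpass]; cases p; simp_all
    obtain ⟨_, hclosed⟩ := satPass_fix hpass'
    intro hre
    refine pvClosed_unreach dest adj b hok reach ?_ s hre hsIR hs
    intro x hxIR hxm
    have hx1 : x < (reach.length : Int) := by
      have := hxIR.2; rw [hlenr]; omega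
    obtain ⟨_, _, hxnd⟩ := hg x hxIR.1 hx1 hxm
    refine ⟨hxnd, fun u hEu => ?_⟩
    obtain ⟨row, hrw, hurow⟩ := hEu
    have hxrange : x ∈ PySem.List.pyRange 0 n 1 := by
      rw [PySem.List.mem_pyRange_one]
      have hx0 := hxIR.1
      have hx2 := hxIR.2
      have hxn : x < (n.toNat : Int) := by omega
      exact ⟨hx0, by omega⟩
    exact (hclosed x hxrange hxm row hrw u hurow).2

-- ── top-level equivalences ──
theorem pvA_iff (source dest : Int) (adjList : List (List Int)) (n : Int)
    (hpre : 0 ≤ source ∧ source < n ∧ source < (adjList.length : Int) ∧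
      ∀ l ∈ adjList, ∀ u ∈ l, 0 ≤ u ∧ u < n ∧ u < (adjList.length : Int)) :
    bfs source dest adjList n = true ↔ pvReach adjList source dest := by
  obtain ⟨h0, h1, hL, hadj⟩ := hpre
  have hok : ∀ l ∈ adjList, ∀ u ∈ l, pvIR (min n.toNat adjList.length) u := by
    intro l hl u hu
    have := hadj l hl u hu
    exact ⟨this.1, by omega⟩
  have hba : min n.toNat adjList.length ≤ adjList.length := Nat.min_le_right _ _
  have hIRs : pvIR (min n.toNat adjList.length) source := ⟨h0, by omega⟩
  have hlenrep : (List.replicate n.toNat false).length = n.toNat := List.length_replicate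
  have hksrc : PySem.List.pyIdx? (List.replicate n.toNat false).length source = some source.toNat := by
    rw [hlenrep]; exact pvIdx_of_IR h0 (by omega)
  have hset := (pvSetD_idx true hksrc).1
  have hbfs : bfs source dest adjList n
      = bfsLoop dest adjList [source] ((List.replicate n.toNat false).set source.toNat true) := by
    rw [bfs]
    simp only [hset]
  have hlen1 : min n.toNat adjList.length ≤ ((List.replicate n.toNat false).set source.toNat true).length := by
    rw [List.length_set, hlenrep]; omega
  constructor
  · intro h
    rw [hbfs] at h
    apply pvA_sound dest adjList source [source] _ h
    intro v hv
    rcases List.mem_cons.mp hv with h' | h'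
    · subst h'; exact Relation.ReflTransGen.refl
    · simp at h'
  · intro hre
    by_contra hft
    have hfalse : bfs source dest adjList n = false := by
      cases hb : bfs source dest adjList n
      · rfl
      · exact absurd hb hft
    rw [hbfs] at hfalse
    have hinv0 : ∀ x, pvIR (min n.toNat adjList.length) x →
        PySem.List.pyGetD ((List.replicate n.toNat false).set source.toNat true) x true = true →
        x ∈ [source] ∨ (x ≠ dest ∧ ∀ u, pvE adjList x u →
          PySem.List.pyGetD ((List.replicate n.toNat false).set source.toNat true) u true = true
            ∨ u ∈ [source]) := by
      intro x hxIR hx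
      by_cases hxs : x = source
      · subst hxs; exact Or.inl List.mem_cons_self
      · exfalso
        have hkx : PySem.List.pyIdx? (List.replicate n.toNat false).length x = some x.toNat := by
          rw [hlenrep]; exact pvIdx_of_IR hxIR.1 (by have := hxIR.2; omega)
        have hxns : x.toNat ≠ source.toNat := by
          have := hxIR.1; have := hIRs.1; omega
        rw [pvGetD_set_other hkx hxns] at hx
        rw [pvGetD_replicate_false hxIR.1 (by have := hxIR.2; omega)] at hx
        cases hx
    exact pvA_complete dest adjList (min n.toNat adjList.length) hok hba [source] _ hlen1 (by
        intro v hv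
        rcases List.mem_cons.mp hv with h' | h'
        · subst h'; exact hIRs
        · simp at h') hinv0 hfalse source hIRs (Or.inr List.mem_cons_self) hre

theorem pvB_iff (source dest : Int) (adjList : List (List Int)) (n : Int)
    (hsd : source ≠ dest)
    (hpre : 0 ≤ source ∧ source < n ∧ source < (adjList.length : Int) ∧
      ∀ l ∈ adjList, ∀ u ∈ l, 0 ≤ u ∧ u < n ∧ u < (adjList.length : Int)) :
    bfs_alt source dest adjList n = true ↔ pvReach adjList source dest := by
  obtain ⟨h0, h1, hL, hadj⟩ := hpre
  have hok : ∀ l ∈ adjList, ∀ u ∈ l, pvIR (min n.toNat adjList.length) u := by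
    intro l hl u hu
    have := hadj l hl u hu
    exact ⟨this.1, by omega⟩
  have hba : min n.toNat adjList.length ≤ adjList.length := Nat.min_le_right _ _
  have hbn : min n.toNat adjList.length ≤ n.toNat := Nat.min_le_left _ _
  have hIRs : pvIR (min n.toNat adjList.length) source := ⟨h0, by omega⟩
  have hlenrep : (List.replicate n.toNat false).length = n.toNat := List.length_replicate
  have hksrc : PySem.List.pyIdx? (List.replicate n.toNat false).length source = some source.toNat := by
    rw [hlenrep]; exact pvIdx_of_IR h0 (by omega)
  have hset := (pvSetD_idx true hksrc).1
  have halt : bfs_alt source dest adjList n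
      = satLoop dest adjList n ((List.replicate n.toNat false).set source.toNat true) := by
    rw [bfs_alt]
    simp only [hset, if_neg hsd]
  have hlenr : ((List.replicate n.toNat false).set source.toNat true).length = n.toNat := by
    rw [List.length_set, hlenrep]
  have hg0 : pvGood adjList (min n.toNat adjList.length) source dest
      ((List.replicate n.toNat false).set source.toNat true) := by
    intro x hx0 hx1 hxm
    rw [hlenr] at hx1
    by_cases hxs : x = source
    · subst hxs; exact ⟨hIRs, Relation.ReflTransGen.refl, hsd⟩
    · exfalso
      have hkx : PySem.List.pyIdx? (List.replicate n.toNat false).length x = some x.toNat := by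
        rw [hlenrep]; exact pvIdx_of_IR hx0 (by omega)
      have hxns : x.toNat ≠ source.toNat := by omega
      rw [pvGetD_set_other hkx hxns] at hxm
      rw [pvGetD_replicate_false hx0 (by omega)] at hxm
      cases hxm
  have hsmk : PySem.List.pyGetD ((List.replicate n.toNat false).set source.toNat true)
      source true = true := pvGetD_set_self hksrc
  rw [halt]
  constructor
  · exact satLoop_sound hok hba hbn _ hlenr hg0
  · intro hre
    by_contra hft
    have hfalse : satLoop dest adjList n ((List.replicate n.toNat false).set source.toNat true) = false := by
      cases hb : satLoop dest adjList n ((List.replicate n.toNat false).set source.toNat true)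
      · rfl
      · exact absurd hb hft
    exact satLoop_complete hok hba hbn hIRs _ hlenr hg0 hsmk hfalse hre

theorem pvIdx_some_of_inrange {m : Nat} {i : Int} (h0 : -(m : Int) ≤ i) (h1 : i < (m : Int)) :
    ∃ k, PySem.List.pyIdx? m i = some k := by
  unfold PySem.List.pyIdx?
  split_ifs
  all_goals first | exact ⟨_, rfl⟩ | omega

theorem pvA_self (source : Int) (adjList : List (List Int)) (n : Int)
    (h0 : -n ≤ source) (h1 : source < n) :
    bfs source source adjList n = true := by
  have h0' : -((List.replicate n.toNat false).length : Int) ≤ source := by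
    rw [List.length_replicate]; omega
  have h1' : source < ((List.replicate n.toNat false).length : Int) := by
    rw [List.length_replicate]; omega
  obtain ⟨k, hk⟩ := pvIdx_some_of_inrange h0' h1'
  have hset := (pvSetD_idx true hk).1
  rw [bfs]
  simp only [hset]
  exact bfsLoop_cons_self source adjList [] _

theorem pvB_self (source : Int) (adjList : List (List Int)) (n : Int)
    (h0 : -n ≤ source) (h1 : source < n) :
    bfs_alt source source adjList n = true := by
  have h0' : -((List.replicate n.toNat false).length : Int) ≤ source := by
    rw [List.length_replicate]; omega
  have h1' : source < ((List.replicate n.toNat false).length : Int) := by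
    rw [List.length_replicate]; omega
  obtain ⟨k, hk⟩ := pvIdx_some_of_inrange h0' h1'
  have hset := (pvSetD_idx true hk).1
  rw [bfs_alt]
  simp [hset]

theorem bfsScan_none_of_mem {dest : Int} {vs : List Bool} {l acc : List Int}
    (h : dest ∈ l) : bfsScan dest vs l acc = none := by
  induction l generalizing acc with
  | nil => simp at h
  | cons a rest ih =>
    unfold bfsScan
    split_ifs with h1 h2
    · rfl
    · refine ih ?_
      rcases List.mem_cons.mp h with h' | h'
      · exact absurd h'.symm h1
      · exact h'
    · refine ih ?_
      rcases List.mem_cons.mp h with h' | h'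
      · exact absurd h'.symm h1
      · exact h'

theorem pvA_neighbor (source dest : Int) (adjList : List (List Int)) (n : Int)
    (h0 : -n ≤ source) (h1 : source < n) (hds : source ≠ dest)
    (l : List Int) (hrow : PySem.List.pyGet? adjList source = some l) (hml : dest ∈ l) :
    bfs source dest adjList n = true := by
  have h0' : -((List.replicate n.toNat false).length : Int) ≤ source := by
    rw [List.length_replicate]; omega
  have h1' : source < ((List.replicate n.toNat false).length : Int) := by
    rw [List.length_replicate]; omega
  obtain ⟨k, hk⟩ := pvIdx_some_of_inrange h0' h1'
  have hset := (pvSetD_idx true hk).1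
  rw [bfs]
  simp only [hset]
  have hk2 : PySem.List.pyIdx? ((List.replicate n.toNat false).set k true).length source = some k := by
    rw [List.length_set]; exact hk
  exact bfsLoop_cons_scan_none hds (pvSetD_idx true hk2).1 hrow (bfsScan_none_of_mem hml)

-- skip a prefix of unmarked sweep indices
theorem satPass_skip {dest : Int} {adj : List (List Int)} {vs1 vs2 : List Int}
    {reach : List Bool} {ch : Bool}
    (hskip : ∀ v ∈ vs1, PySem.List.pyGet? reach v = some false) :
    satPass dest adj (vs1 ++ vs2) reach ch = satPass dest adj vs2 reach ch := by
  induction vs1 with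
  | nil => rfl
  | cons v rest ih =>
    rw [List.cons_append, satPass_cons_skip (hskip v List.mem_cons_self)]
    exact ih (fun w hw => hskip w (List.mem_cons_of_mem _ hw))

theorem pvB_neighbor (source dest : Int) (adjList : List (List Int)) (n : Int)
    (h0 : 0 ≤ source) (h1 : source < n) (hds : source ≠ dest)
    (l : List Int) (hrow : PySem.List.pyGet? adjList source = some l) (hml : dest ∈ l) :
    bfs_alt source dest adjList n = true := by
  have hlenrep : (List.replicate n.toNat false).length = n.toNat := List.length_replicate
  have hksrc : PySem.List.pyIdx? (List.replicate n.toNat false).length source = some source.toNat := by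
    rw [hlenrep]; exact pvIdx_of_IR h0 (by omega)
  have hset := (pvSetD_idx true hksrc).1
  rw [bfs_alt]
  simp only [hset, if_neg hds]
  have hsplit : PySem.List.pyRange 0 n 1
      = PySem.List.pyRange 0 source 1 ++ (source :: PySem.List.pyRange (source + 1) n 1) := by
    rw [PySem.List.pyRange_one_append 0 source n h0 (le_of_lt h1),
      PySem.List.pyRange_one_cons h1]
  have hslt : source.toNat < n.toNat := by omega
  have hskip : ∀ v ∈ PySem.List.pyRange 0 source 1,
      PySem.List.pyGet? ((List.replicate n.toNat false).set source.toNat true) v = some false := by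
    intro v hv
    rw [PySem.List.mem_pyRange_one] at hv
    rw [PySem.List.pyGet?_of_nonneg _ hv.1]
    rw [List.getElem?_set_ne (by omega)]
    rw [List.getElem?_replicate]
    have : v.toNat < n.toNat := by omega
    simp [this]
  have hsrc : PySem.List.pyGet? ((List.replicate n.toNat false).set source.toNat true) source
      = some true := by
    rw [PySem.List.pyGet?_of_nonneg _ h0]
    rw [List.getElem?_set_eq_of_lt _ (by rw [hlenrep]; exact hslt)]
  have hpass : satPass dest adjList (PySem.List.pyRange 0 n 1)
      ((List.replicate n.toNat false).set source.toNat true) false = some none := by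
    rw [hsplit, satPass_skip hskip,
      satPass_cons_found hsrc hrow (satRow_none_of_mem hml)]
  exact satLoop_eq_found hpass

-- ===== VERDICT (by name: the statement is the Claim_ definition above) =====
theorem bfs_spec : Claim_equal_bfs := by
  intro source dest adjList n _ hpre
  unfold Spec_bfs
  rcases hpre with hcanon | ⟨h0, h1, hsd⟩ | ⟨h0, h1, hL, hds, hml, _⟩
  · by_cases hsd : source = dest
    · subst hsd
      rw [pvA_self source adjList n (by have := hcanon.1; omega) hcanon.2.1]
      rw [pvB_self source adjList n (by have := hcanon.1; omega) hcanon.2.1]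
    · exact Bool.eq_iff_iff.mpr ((pvA_iff source dest adjList n hcanon).trans
        (pvB_iff source dest adjList n hsd hcanon).symm)
  · subst hsd
    rw [pvA_self source adjList n h0 h1]
    rw [pvB_self source adjList n h0 h1]
  · cases hrow : PySem.List.pyGet? adjList source with
    | none => rw [hrow] at hml; simp at hml
    | some l =>
      rw [hrow] at hml
      simp only [Option.getD_some] at hml
      rw [pvA_neighbor source dest adjList n (by omega) h1 hds l hrow hml,
        pvB_neighbor source dest adjList n h0 h1 hds l hrow hml]
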